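-- pv_equiv track=rewrite | github.com/UltimateWilliamWu/Personal_Blog | content/UNSW/Principles of Programming/Lab/pythonProject/Assignment/Ass2/Assignment2.py | decode_options
-- ===== SOURCE A (Python) =====
-- def decode_options(options):
--     flip_x, flip_y, angle = False, False, 0
--     for option in options:
--         name, value = option.split("=")
--         if name == "xscale" and value == "-1":
--             flip_x = True
--         if name == "yscale" and value == "-1":
--             flip_y = True
--         if name == "rotate":
--             angle = int(value)
--     if flip_x and flip_y:
--         angle += 180
--         flip_x, flip_y = False, False
--     return flip_x, flip_y, angle % 360
-- ===== SOURCE B (Python) =====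
-- def decode_options(options):
--     pairs = [(name, value) for name, value in (option.split("=") for option in options)]
--     flip_x = any(n == "xscale" and v == "-1" for n, v in pairs)
--     flip_y = any(n == "yscale" and v == "-1" for n, v in pairs)
--     rotations = [int(v) for n, v in pairs if n == "rotate"]
--     angle = rotations[-1] if rotations else 0
--     if flip_x and flip_y:
--         return False, False, (angle + 180) % 360
--     return flip_x, flip_y, angle % 360
-- ===== Notes on version B (the rewrite author's own statement) =====
-- stated objective: alternative
-- what changed: Replaces A's single stateful loop over three mutable variables by a parse-once pass into (name,value) pairs followed by declarative per-output scans: any() for each flip flag and a comprehension taking the last rotate value.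
import Mathlib
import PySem

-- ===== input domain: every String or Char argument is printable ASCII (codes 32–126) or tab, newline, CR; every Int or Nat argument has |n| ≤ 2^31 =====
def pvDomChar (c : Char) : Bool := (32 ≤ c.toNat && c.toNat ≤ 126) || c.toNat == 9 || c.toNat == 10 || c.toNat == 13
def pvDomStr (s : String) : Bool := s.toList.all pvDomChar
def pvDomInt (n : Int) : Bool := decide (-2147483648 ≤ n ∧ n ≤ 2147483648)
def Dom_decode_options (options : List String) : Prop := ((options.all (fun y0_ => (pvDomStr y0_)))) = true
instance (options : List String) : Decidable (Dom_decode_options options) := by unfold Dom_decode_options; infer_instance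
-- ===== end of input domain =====

-- B replaces A's single stateful loop by a parse-once pass into pairs plus declarative per-output scans (alternative decomposition, same cost).
-- Pre_ excludes exactly the inputs on which A raises: an option without exactly one '=' (ValueError from unpacking split) or a rotate value int() rejects.


-- ===== PORT A =====
-- one fold over the three mutable variables, exactly A's loop body
def aStep (st : Bool × Bool × Int) (option : String) : Bool × Bool × Int :=
  match PySem.Str.split? option "=" with
  | some [name, value] =>
    let fx := if name == "xscale" && value == "-1" then true else st.1
    let fy := if name == "yscale" && value == "-1" then true else st.2.1
    let a  := if name == "rotate" then (PySem.Int.ofStr? value).getD st.2.2 else st.2.2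
    (fx, fy, a)
  | _ => st  -- Python raises ValueError here; excluded by Pre_

def decode_options (options : List String) : Bool × Bool × Int :=
  let r := options.foldl aStep (false, false, (0 : Int))
  if r.1 && r.2.1 then (false, false, PySem.Int.mod (r.2.2 + 180) 360)
  else (r.1, r.2.1, PySem.Int.mod r.2.2 360)

-- ===== PORT B =====
def bPair (option : String) : String × String :=
  match PySem.Str.split? option "=" with
  | some [name, value] => (name, value)
  | _ => ("", "")  -- Python raises ValueError here; excluded by Pre_

def decode_options_alt (options : List String) : Bool × Bool × Int :=
  let pairs := options.map bPair
  let flip_x := pairs.any (fun p => p.1 == "xscale" && p.2 == "-1")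
  let flip_y := pairs.any (fun p => p.1 == "yscale" && p.2 == "-1")
  let rotations := (pairs.filter (fun p => p.1 == "rotate")).map (fun p => (PySem.Int.ofStr? p.2).getD 0)
  let angle := rotations.getLast?.getD 0
  if flip_x && flip_y then (false, false, PySem.Int.mod (angle + 180) 360)
  else (flip_x, flip_y, PySem.Int.mod angle 360)

-- ===== PRECONDITION & SPEC =====
-- an option is fine iff split("=") yields exactly two parts and, for rotate, int(value) parses
def okOpt (o : String) : Bool :=
  match PySem.Str.split? o "=" with
  | some [name, value] => if name == "rotate" then (PySem.Int.ofStr? value).isSome else true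
  | _ => false

def Pre_decode_options (options : List String) : Prop := ∀ o ∈ options, okOpt o = true
instance (options : List String) : Decidable (Pre_decode_options options) := by unfold Pre_decode_options; infer_instance
def pvWitness_decode_options : List String := ["xscale=-1", "rotate=90"]

def Spec_decode_options (options : List String) (out : Bool × Bool × Int) : Prop := out = decode_options_alt options
instance (options : List String) (out : Bool × Bool × Int) : Decidable (Spec_decode_options options out) := by unfold Spec_decode_options; infer_instance

-- ===== CLAIM (what is proved, stated in full; the proofs are below) =====
def Claim_equal_decode_options : Prop := ∀ (options : List String), Dom_decode_options options → Pre_decode_options options → Spec_decode_options options (decode_options options)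

-- ===== LEMMAS AND PROOFS =====
theorem getLastD_cons {α : Type} (x d : α) (l : List α) :
    (x :: l).getLast?.getD d = l.getLast?.getD x := by
  cases l with
  | nil => rfl
  | cons y t =>
    rw [List.getLast?_cons_cons]
    cases hl : (y :: t).getLast? with
    | none => exact absurd (List.getLast?_eq_none_iff.mp hl) (by simp)
    | some z => rfl

-- the fold of A's loop body, characterised by B's three scans, for any start state
theorem fold_char (opts : List String) (fx fy : Bool) (a : Int)
    (h : ∀ o ∈ opts, okOpt o = true) :
    opts.foldl aStep (fx, fy, a) =
      (fx || (opts.map bPair).any (fun p => p.1 == "xscale" && p.2 == "-1"),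
       fy || (opts.map bPair).any (fun p => p.1 == "yscale" && p.2 == "-1"),
       ((((opts.map bPair).filter (fun p => p.1 == "rotate")).map
          (fun p => (PySem.Int.ofStr? p.2).getD 0)).getLast?.getD a)) := by
  induction opts generalizing fx fy a with
  | nil => simp
  | cons o t ih =>
    have ho := h o (by simp)
    have ht : ∀ o' ∈ t, okOpt o' = true := fun o' m => h o' (by simp [m])
    unfold okOpt at ho
    simp only [List.foldl_cons, List.map_cons, List.any_cons, List.filter_cons]
    cases hsp : PySem.Str.split? o "=" with
    | none => simp [hsp] at ho
    | some parts =>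
      cases parts with
      | nil => simp [hsp] at ho
      | cons n rest =>
        cases rest with
        | nil => simp [hsp] at ho
        | cons v rest2 =>
          cases rest2 with
          | cons _ _ => simp [hsp] at ho
          | nil =>
            simp only [hsp] at ho
            have hb : bPair o = (n, v) := by simp [bPair, hsp]
            have ha : aStep (fx, fy, a) o =
                (if n == "xscale" && v == "-1" then true else fx,
                 if n == "yscale" && v == "-1" then true else fy,
                 if n == "rotate" then (PySem.Int.ofStr? v).getD a else a) := by
              simp [aStep, hsp]
            rw [ha, ih _ _ _ ht, hb]
            refine Prod.ext ?_ (Prod.ext ?_ ?_)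
            · cases (n == "xscale" && v == "-1") <;> simp
            · cases (n == "yscale" && v == "-1") <;> simp
            · by_cases hr : (n == "rotate") = true
              · have hs : (PySem.Int.ofStr? v).isSome := by simpa [hr] using ho
                obtain ⟨k, hk⟩ := Option.isSome_iff_exists.mp hs
                simp [hr, hk, getLastD_cons]
              · simp at hr
                simp [hr]

-- ===== VERDICT (by name: the statement is the Claim_ definition above) =====
theorem decode_options_spec : Claim_equal_decode_options := by
  intro options _ hpre
  unfold Spec_decode_options decode_options decode_options_alt
  rw [fold_char options false false 0 hpre]
  simp
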